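-- pv_equiv track=rewrite | github.com/vmkmym/Algorithm | 프로그래머스/Lv.1/42840. 모의고사/모의고사.py | solution
-- ===== SOURCE A (Python) =====
-- def solution(answers):
--     correct_person = []
--     correct_cnt = [0, 0, 0]
--     pattern1 = [1, 2, 3, 4, 5]
--     pattern2 = [2, 1, 2, 3, 2, 4, 2, 5]
--     pattern3 = [3, 3, 1, 1, 2, 2, 4, 4, 5, 5]
--     # 정답 개수를 세는 반복문
--     for i in range(len(answers)):
--         if answers[i] == pattern1[i % 5]:
--             correct_cnt[0] += 1
--         if answers[i] == pattern2[i % 8]: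
--             correct_cnt[1] += 1
--         if answers[i] == pattern3[i % 10]:
--             correct_cnt[2] += 1
--     # 가장 많이 맞춘 사람을 찾는 반복문
--     for i in range(3):
--         if correct_cnt[i] == max(correct_cnt):
--             correct_person.append(i + 1)
--     correct_person.sort()
--     return correct_person
-- ===== SOURCE B (Python) =====
-- def solution(answers):
--     # lcm(5, 8, 10) = 40: positions that are equal mod 40 see the same entry of
--     # every pattern, so a histogram over (i % 40, answer) determines all scores.
--     hist = {}
--     for i, a in enumerate(answers):
--         k = (i % 40, a)
--         hist[k] = hist.get(k, 0) + 1
--     patterns = [[1, 2, 3, 4, 5],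
--                 [2, 1, 2, 3, 2, 4, 2, 5],
--                 [3, 3, 1, 1, 2, 2, 4, 4, 5, 5]]
--     scores = [sum(hist.get((r, p[r % len(p)]), 0) for r in range(40))
--               for p in patterns]
--     best = max(scores)
--     return [i + 1 for i, s in enumerate(scores) if s == best]
-- ===== Notes on version B (the rewrite author's own statement) =====
-- stated objective: alternative
-- what changed: Instead of comparing every answer against all three patterns in one interleaved loop, B builds a frequency table keyed by (index mod 40, answer) (40 = lcm of the pattern lengths) in one pass and then reads each pattern's score off the 40 residue classes with dictionary lookups.
import Mathlib
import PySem

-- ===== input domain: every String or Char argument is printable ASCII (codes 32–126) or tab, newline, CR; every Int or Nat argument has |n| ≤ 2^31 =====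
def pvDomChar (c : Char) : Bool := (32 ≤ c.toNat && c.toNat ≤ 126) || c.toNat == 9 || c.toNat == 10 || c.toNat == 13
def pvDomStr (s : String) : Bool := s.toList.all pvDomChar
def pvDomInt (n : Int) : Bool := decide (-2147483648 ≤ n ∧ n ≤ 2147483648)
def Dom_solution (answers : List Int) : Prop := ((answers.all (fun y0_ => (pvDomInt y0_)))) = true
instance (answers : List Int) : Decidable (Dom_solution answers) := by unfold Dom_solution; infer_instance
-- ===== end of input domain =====

-- B replaces A's three interleaved per-element pattern comparisons by a residue-class
-- histogram keyed by (i % 40, answer) (40 = lcm of the pattern lengths), from which each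
-- pattern's score is read off in 40 lookups; objective: alternative algorithm, same O(n).

-- ===== PORT A =====
def pvPat1 : List Int := [1, 2, 3, 4, 5]
def pvPat2 : List Int := [2, 1, 2, 3, 2, 4, 2, 5]
def pvPat3 : List Int := [3, 3, 1, 1, 2, 2, 4, 4, 5, 5]

-- the indexed for-loop: i ranges over range(len(answers)), answers[i] is ia.1 of zipIdx
def solution (answers : List Int) : List Int :=
  let cnt : Nat × Nat × Nat :=
    (answers.zipIdx).foldl
      (fun (c : Nat × Nat × Nat) ia =>
        let c0 := if ia.1 = pvPat1.getD (ia.2 % 5) 0 then c.1 + 1 else c.1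
        let c1 := if ia.1 = pvPat2.getD (ia.2 % 8) 0 then c.2.1 + 1 else c.2.1
        let c2 := if ia.1 = pvPat3.getD (ia.2 % 10) 0 then c.2.2 + 1 else c.2.2
        (c0, c1, c2)) (0, 0, 0)
  let cl : List Nat := [cnt.1, cnt.2.1, cnt.2.2]
  let m := cl.foldl max 0            -- max(correct_cnt): max of a list of non-negative counts
  let person := (List.range 3).foldl
      (fun (acc : List Int) i => if cl.getD i 0 = m then acc ++ [(i : Int) + 1] else acc) []
  PySem.List.sorted person (fun x => x) false

-- ===== PORT B =====
-- hist[(i % 40, a)] += 1 over enumerate(answers)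
def pvHist (answers : List Int) : PySem.Dict (Nat × Int) Int :=
  (answers.zipIdx).foldl
    (fun d ia => d.insert (ia.2 % 40, ia.1) (d.getD (ia.2 % 40, ia.1) 0 + 1))
    PySem.Dict.empty

-- sum(hist.get((r, p[r % len(p)]), 0) for r in range(40))
def pvScoreH (hist : PySem.Dict (Nat × Int) Int) (p : List Int) : Int :=
  ((List.range 40).map (fun r => hist.getD (r, p.getD (r % p.length) 0) 0)).sum

def solution_alt (answers : List Int) : List Int :=
  let hist := pvHist answers
  let scores := [pvPat1, pvPat2, pvPat3].map (fun p => pvScoreH hist p)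
  let best := scores.foldl max 0     -- max(scores): max of three non-negative counts
  (scores.zipIdx).filterMap
    (fun is => if is.1 = best then some ((is.2 : Int) + 1) else none)

-- ===== PRECONDITION & SPEC =====
def Spec_solution (answers : List Int) (out : List Int) : Prop := out = solution_alt answers
instance (answers : List Int) (out : List Int) : Decidable (Spec_solution answers out) := by unfold Spec_solution; infer_instance

-- ===== CLAIM (what is proved, stated in full; the proofs are below) =====
def Claim_equal_solution : Prop := ∀ (answers : List Int), Dom_solution answers → Spec_solution answers (solution answers)

-- ===== LEMMAS AND PROOFS =====

def pvP1 (ia : Int × Nat) : Bool := ia.1 == pvPat1.getD (ia.2 % 5) 0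
def pvP2 (ia : Int × Nat) : Bool := ia.1 == pvPat2.getD (ia.2 % 8) 0
def pvP3 (ia : Int × Nat) : Bool := ia.1 == pvPat3.getD (ia.2 % 10) 0

def pvKey (ia : Int × Nat) : Nat × Int := (ia.2 % 40, ia.1)

theorem pv_loop_eq (l : List (Int × Nat)) : ∀ a b c : Nat,
    l.foldl
      (fun (c : Nat × Nat × Nat) ia =>
        let c0 := if ia.1 = pvPat1.getD (ia.2 % 5) 0 then c.1 + 1 else c.1
        let c1 := if ia.1 = pvPat2.getD (ia.2 % 8) 0 then c.2.1 + 1 else c.2.1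
        let c2 := if ia.1 = pvPat3.getD (ia.2 % 10) 0 then c.2.2 + 1 else c.2.2
        (c0, c1, c2)) (a, b, c)
    = (a + l.countP pvP1, b + l.countP pvP2, c + l.countP pvP3) := by
  induction l with
  | nil => simp
  | cons x xs ih =>
    intro a b c
    simp only [List.foldl_cons, List.countP_cons, ih, pvP1, pvP2, pvP3]
    refine Prod.ext ?_ (Prod.ext ?_ ?_) <;> simp <;> split_ifs <;> simp_all <;> omega

theorem pv_hist_getD (answers : List Int) (k : Nat × Int) :
    (pvHist answers).getD k 0 = ((answers.zipIdx.map pvKey).count k : Int) := by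
  unfold pvHist
  have h : (answers.zipIdx).foldl
      (fun d ia => d.insert (ia.2 % 40, ia.1) (d.getD (ia.2 % 40, ia.1) 0 + 1))
      (PySem.Dict.empty : PySem.Dict (Nat × Int) Int)
      = (answers.zipIdx.map pvKey).foldl
          (fun d x => d.insert x (d.getD x 0 + 1)) PySem.Dict.empty := by
    rw [List.foldl_map]; rfl
  rw [h, PySem.Dict.getD_foldl_insert_add_one]
  simp [PySem.Dict.getD_empty]

theorem pv_listsum_eq {M : Type} [AddCommMonoid M] (n : Nat) (f : Nat → M) :
    ((List.range n).map f).sum = ∑ r ∈ Finset.range n, f r := by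
  induction n with
  | zero => simp
  | succ n ih => simp [List.range_succ, Finset.sum_range_succ, ih]

theorem pv_sum_count (v : Nat → Int) (l : List (Int × Nat)) :
    ((List.range 40).map (fun r => ((l.map pvKey).count (r, v r) : Int))).sum
      = (l.countP (fun ia => ia.1 == v (ia.2 % 40)) : Int) := by
  rw [pv_listsum_eq]
  induction l with
  | nil => simp
  | cons x xs ih =>
    simp only [List.map_cons, List.count_cons, List.countP_cons]
    push_cast
    rw [Finset.sum_add_distrib, ih]
    have hx : ∀ r : Nat, (if pvKey x = (r, v r) then (1 : Int) else 0)
        = (if r = x.2 % 40 then (if x.1 = v (x.2 % 40) then (1 : Int) else 0) else 0) := by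
      intro r
      by_cases hr : r = x.2 % 40 <;> simp [pvKey, Prod.ext_iff, hr, eq_comm]
    have hone : ∑ r ∈ Finset.range 40, (if pvKey x = (r, v r) then (1 : Int) else 0)
        = (if x.1 = v (x.2 % 40) then (1 : Int) else 0) := by
      rw [Finset.sum_congr rfl (fun r _ => hx r), Finset.sum_ite_eq' (Finset.range 40)]
      simp [Nat.mod_lt x.2 (by norm_num : (0 : Nat) < 40)]
    simp only [beq_iff_eq]
    rw [hone]

theorem pv_score_eq (answers : List Int) (p : List Int) (hd : p.length ∣ 40) :
    pvScoreH (pvHist answers) p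
      = ((answers.zipIdx).countP (fun ia => ia.1 == p.getD (ia.2 % p.length) 0) : Int) := by
  unfold pvScoreH
  have h1 : ((List.range 40).map (fun r => (pvHist answers).getD (r, p.getD (r % p.length) 0) 0)).sum
      = ((List.range 40).map (fun r =>
          (((answers.zipIdx.map pvKey).count (r, p.getD (r % p.length) 0)) : Int))).sum := by
    congr 1
    exact List.map_congr_left (fun r _ => pv_hist_getD answers _)
  rw [h1, pv_sum_count (fun r => p.getD (r % p.length) 0)]
  congr 1
  apply List.countP_congr
  intro ia _
  rw [Nat.mod_mod_of_dvd _ hd]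

theorem pv_tail_core (n1 n2 n3 M : Nat) :
    (PySem.List.sorted
        (if n3 = M then
          (if n2 = M then (if n1 = M then [] ++ [((0:Nat) : Int) + 1] else []) ++ [((1:Nat) : Int) + 1]
            else if n1 = M then [] ++ [((0:Nat) : Int) + 1] else []) ++
            [((2:Nat):Int) + 1]
        else
          if n2 = M then (if n1 = M then [] ++ [((0:Nat):Int) + 1] else []) ++ [((1:Nat):Int) + 1]
          else if n1 = M then [] ++ [((0:Nat):Int) + 1] else [])
        (fun x => x) false) =
      List.filterMap (fun x => if x.1 = M then some ((x.2:Int) + 1) else none)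
        [(n1, (0:Nat)), (n2, 0 + 1), (n3, 0 + 1 + 1)] := by
  split_ifs <;>
    simp_all only [List.filterMap_cons, List.filterMap_nil, if_true, if_false,
      List.nil_append] <;> decide

theorem pv_tail_eq (n1 n2 n3 : Nat) :
    (let cl : List Nat := [n1, n2, n3]
     let m := cl.foldl max 0
     let person := (List.range 3).foldl
        (fun (acc : List Int) i => if cl.getD i 0 = m then acc ++ [(i : Int) + 1] else acc) []
     PySem.List.sorted person (fun x => x) false)
    = (let best := [n1, n2, n3].foldl max 0
       ([n1, n2, n3].zipIdx).filterMap
         (fun is => if is.1 = best then some ((is.2 : Int) + 1) else none)) := by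
  simp only [List.zipIdx, List.range, List.range.loop, List.foldl, List.getD, List.getElem?_cons_zero,
    List.getElem?_cons_succ, Option.getD_some]
  exact pv_tail_core n1 n2 n3 _

-- B's Int-valued three-element tail equals the same tail over the underlying Nat counts
theorem pv_cast_tail (n1 n2 n3 : Nat) :
    (let scores : List Int := [(n1 : Int), (n2 : Int), (n3 : Int)]
     let best := scores.foldl max 0
     (scores.zipIdx).filterMap
       (fun is => if is.1 = best then some ((is.2 : Int) + 1) else none))
    = (let best := [n1, n2, n3].foldl max 0
       ([n1, n2, n3].zipIdx).filterMap
         (fun is => if is.1 = best then some ((is.2 : Int) + 1) else none)) := by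
  simp only [List.zipIdx, List.foldl, List.filterMap]
  norm_cast

-- ===== VERDICT (by name: the statement is the Claim_ definition above) =====
theorem solution_spec : Claim_equal_solution := by
  intro answers _
  show solution answers = solution_alt answers
  unfold solution solution_alt
  rw [pv_loop_eq]
  simp only [Nat.zero_add, List.map_cons, List.map_nil]
  simp only [pv_score_eq answers pvPat1 (by decide), pv_score_eq answers pvPat2 (by decide),
      pv_score_eq answers pvPat3 (by decide)]
  exact (pv_tail_eq _ _ _).trans (pv_cast_tail _ _ _).symm
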